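-- pv_equiv track=rewrite | github.com/plumsun/open-english-dictionary | check_json_structure.py | intersect_nested_keysets
-- ===== SOURCE A (Python) =====
-- from typing import Iterable, List, Optional, Set
--
-- def intersect_nested_keysets(
--     nested_items: Iterable[Iterable[dict]],
-- ) -> Set[str]:
--     combined: Set[str] | None = None
--     for collection in nested_items:
--         for item in collection:
--             if combined is None:
--                 combined = set(item.keys())
--             else:
--                 combined &= set(item.keys())
--
--     return combined or set()
-- ===== SOURCE B (Python) =====
-- def intersect_nested_keysets(nested_items):
--     counts = {}
--     total = 0
--     for collection in nested_items:
--         for item in collection: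
--             total += 1
--             for k in item.keys():
--                 counts[k] = counts.get(k, 0) + 1
--     return {k for k, c in counts.items() if c == total}
-- ===== Notes on version B (the rewrite author's own statement) =====
-- stated objective: alternative
-- what changed: Replaces the running set-intersection (building and intersecting a fresh set per dict) by a single counting pass: one frequency table of keys plus a dict counter, returning the keys whose count equals the number of dicts.
import Mathlib
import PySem

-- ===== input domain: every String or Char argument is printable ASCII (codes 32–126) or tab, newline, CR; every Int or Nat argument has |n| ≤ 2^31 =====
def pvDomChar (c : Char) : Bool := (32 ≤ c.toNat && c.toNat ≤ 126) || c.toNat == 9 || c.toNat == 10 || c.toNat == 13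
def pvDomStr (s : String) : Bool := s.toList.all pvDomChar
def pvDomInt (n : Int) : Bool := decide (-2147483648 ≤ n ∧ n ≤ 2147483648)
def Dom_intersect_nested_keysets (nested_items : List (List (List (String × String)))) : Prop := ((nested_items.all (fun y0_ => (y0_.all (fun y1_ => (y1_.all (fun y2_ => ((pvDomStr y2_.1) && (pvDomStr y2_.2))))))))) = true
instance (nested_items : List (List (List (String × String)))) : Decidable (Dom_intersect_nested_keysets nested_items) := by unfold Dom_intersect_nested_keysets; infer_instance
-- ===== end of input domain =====

-- B replaces A's running set-intersection by a single counting pass (key-frequency table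
-- plus a dict counter, keeping the keys whose count equals the dict count); same cost.

-- ===== PORT A =====
def intersect_nested_keysets (nested_items : List (List (List (String × String)))) : List String :=
  let combined : Option (PySem.Set String) :=
    nested_items.foldl (fun comb collection =>
      collection.foldl (fun comb item =>
        match comb with
        | none => some (PySem.Set.ofList (item.map Prod.fst))
        | some s => some (PySem.Set.inter s (PySem.Set.ofList (item.map Prod.fst)))) comb) none
  -- `combined or set()`: None and the empty set both yield set()
  combined.getD []

-- ===== PORT B =====
def intersect_nested_keysets_alt (nested_items : List (List (List (String × String)))) : List String :=
  let st : PySem.Dict String Int × Int :=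
    nested_items.foldl (fun st collection =>
      collection.foldl (fun st item =>
        -- `total += 1`, then `for k in item.keys()` (a dict's keys: first occurrences, in order)
        (PySem.List.dedup (item.map Prod.fst)).foldl
          (fun st k => (st.1.modify k 0 (· + 1), st.2)) (st.1, st.2 + 1)) st)
      (PySem.Dict.empty, 0)
  -- `{k for k, c in counts.items() if c == total}` built in items order (its keys are distinct)
  (st.1.items.filter (fun p => p.2 == st.2)).map Prod.fst

-- ===== PRECONDITION & SPEC =====
def Spec_intersect_nested_keysets (nested_items : List (List (List (String × String)))) (out : List String) : Prop := out = intersect_nested_keysets_alt nested_items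
instance (nested_items : List (List (List (String × String)))) (out : List String) : Decidable (Spec_intersect_nested_keysets nested_items out) := by unfold Spec_intersect_nested_keysets; infer_instance

-- ===== CLAIM (what is proved, stated in full; the proofs are below) =====
def Claim_equal_intersect_nested_keysets : Prop := ∀ (nested_items : List (List (List (String × String)))), Dom_intersect_nested_keysets nested_items → Spec_intersect_nested_keysets nested_items (intersect_nested_keysets nested_items)

-- ===== LEMMAS AND PROOFS =====

-- the deduplicated key list of one dict (proof-side abbreviation)
def pvKeys (item : List (String × String)) : List String :=
  PySem.Set.ofList (item.map Prod.fst)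

-- all keys of all dicts, in first-occurrence order per dict
def pvAllKeys (ds : List (List (String × String))) : List String :=
  (ds.map pvKeys).flatten

theorem pvContains_ofList (xs : List String) (k : String) :
    (PySem.Set.ofList xs).contains k = xs.contains k := by
  simp [PySem.Set.contains_eq_listContains, PySem.Set.mem_ofList]

-- A's fold, once started, is a fold of intersections
theorem pvA_some (ds : List (List (String × String))) (s : PySem.Set String) :
    ds.foldl (fun comb item =>
        match comb with
        | none => some (PySem.Set.ofList (item.map Prod.fst))
        | some s => some (PySem.Set.inter s (PySem.Set.ofList (item.map Prod.fst)))) (some s)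
      = some (ds.foldl (fun s item => PySem.Set.inter s (PySem.Set.ofList (item.map Prod.fst))) s) := by
  induction ds generalizing s with
  | nil => rfl
  | cons d ds ih => simp [List.foldl_cons, ih]

-- a fold of intersections is one filter by membership in every dict's key set
theorem pvFoldl_inter (ds : List (List (String × String))) (s : PySem.Set String) :
    ds.foldl (fun s item => PySem.Set.inter s (PySem.Set.ofList (item.map Prod.fst))) s
      = s.filter (fun k => ds.all (fun item => (item.map Prod.fst).contains k)) := by
  induction ds generalizing s with
  | nil => simp
  | cons d ds ih =>
      rw [List.foldl_cons, ih, PySem.Set.inter, List.filter_filter]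
      apply List.filter_congr
      intro k _
      rw [List.all_cons, pvContains_ofList, Bool.and_comm]

-- B's inner key loop only touches the dict component
theorem pvPairFold (ks : List String) (d : PySem.Dict String Int) (t : Int) :
    ks.foldl (fun st k => (st.1.modify k 0 (· + 1), st.2)) (d, t)
      = (ks.foldl (fun d k => d.modify k 0 (· + 1)) d, t) := by
  induction ks generalizing d with
  | nil => rfl
  | cons k ks ih => simp [List.foldl_cons, ih]

-- B's fold computes (the key-frequency table of all keys, the number of dicts)
theorem pvB_state (ds : List (List (String × String))) (d : PySem.Dict String Int) (t : Int) :
    ds.foldl (fun st item =>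
        (PySem.List.dedup (item.map Prod.fst)).foldl
          (fun st k => (st.1.modify k 0 (· + 1), st.2)) (st.1, st.2 + 1)) (d, t)
      = ((pvAllKeys ds).foldl (fun d k => d.modify k 0 (· + 1)) d, t + ds.length) := by
  induction ds generalizing d t with
  | nil => simp [pvAllKeys]
  | cons x ds ih =>
      rw [List.foldl_cons]
      rw [show (((d, t) : PySem.Dict String Int × Int).1) = d from rfl,
        show (((d, t) : PySem.Dict String Int × Int).2) = t from rfl]
      rw [pvPairFold, ih]
      rw [Prod.mk.injEq]
      constructor
      · simp only [pvAllKeys, List.map_cons, List.flatten_cons, List.foldl_append, pvKeys,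
          PySem.List.dedup_eq_ofList]
      · rw [List.length_cons]
        push_cast
        ring

-- each key is counted once per dict that contains it
theorem pvCount (ds : List (List (String × String))) (k : String) :
    (pvAllKeys ds).count k = ds.countP (fun item => (item.map Prod.fst).contains k) := by
  induction ds with
  | nil => simp [pvAllKeys]
  | cons d ds ih =>
      simp only [pvAllKeys, pvKeys, List.map_cons, List.flatten_cons, List.count_append,
        List.countP_cons] at *
      rw [ih]
      by_cases h : k ∈ d.map Prod.fst
      · rw [List.count_eq_one_of_mem (PySem.Set.nodup_ofList _) ((PySem.Set.mem_ofList _ _).2 h)]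
        simp [h, Nat.add_comm]
      · rw [List.count_eq_zero_of_not_mem (fun hm => h ((PySem.Set.mem_ofList _ _).1 hm))]
        simp [h]

-- the count equals the number of dicts iff the key occurs in every dict
theorem pvCountEq (ds : List (List (String × String))) (k : String) :
    (((pvAllKeys ds).count k : Int) == (ds.length : Int))
      = ds.all (fun item => (item.map Prod.fst).contains k) := by
  rw [pvCount]
  by_cases hc : ds.countP (fun item => (item.map Prod.fst).contains k) = ds.length
  · rw [hc, beq_self_eq_true]
    exact (List.all_eq_true.2 (List.countP_eq_length.1 hc)).symm
  · have h1 : ((ds.countP (fun item => (item.map Prod.fst).contains k) : Int) == (ds.length : Int)) = false := by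
      simp only [beq_eq_false_iff_ne, ne_eq, Nat.cast_inj]
      exact hc
    rw [h1]
    cases hall : ds.all (fun item => (item.map Prod.fst).contains k) with
    | false => rfl
    | true => exact absurd (List.countP_eq_length.2 (List.all_eq_true.1 hall)) hc

-- the two programs agree, stated over the flattened list of dicts
theorem pvMain (ds : List (List (String × String))) :
    (ds.foldl (fun comb item =>
        match comb with
        | none => some (PySem.Set.ofList (item.map Prod.fst))
        | some s => some (PySem.Set.inter s (PySem.Set.ofList (item.map Prod.fst)))) none).getD []
      = (((ds.foldl (fun (st : PySem.Dict String Int × Int) item =>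
            (PySem.List.dedup (item.map Prod.fst)).foldl
              (fun st k => (st.1.modify k 0 (· + 1), st.2)) (st.1, st.2 + 1)) (PySem.Dict.empty, 0)).1.items.filter
          (fun p => p.2 == (ds.foldl (fun (st : PySem.Dict String Int × Int) item =>
            (PySem.List.dedup (item.map Prod.fst)).foldl
              (fun st k => (st.1.modify k 0 (· + 1), st.2)) (st.1, st.2 + 1)) (PySem.Dict.empty, 0)).2)).map Prod.fst) := by
  rw [pvB_state]
  dsimp only
  rw [← PySem.Dict.counter_eq_foldl, PySem.Dict.items_counter, zero_add]
  rw [List.filter_map, List.map_map]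
  have hB : (List.filter ((fun p : String × Int => p.2 == (ds.length : Int)) ∘ fun k => (k, ((pvAllKeys ds).count k : Int))) (PySem.Set.ofList (pvAllKeys ds))).map (Prod.fst ∘ fun k => (k, ((pvAllKeys ds).count k : Int)))
        = (PySem.Set.ofList (pvAllKeys ds)).filter (fun k => ds.all (fun item => (item.map Prod.fst).contains k)) := by
    rw [List.map_id'']
    · apply List.filter_congr
      intro k _
      simpa using pvCountEq ds k
    · intro x
      rfl
  rw [hB]
  cases ds with
  | nil => rfl
  | cons d rest =>
      rw [List.foldl_cons]
      dsimp only
      -- the two `match` expressions are definitionally equal aux matchers; go through congrArg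
      refine Eq.trans (congrArg (fun o : Option (PySem.Set String) => o.getD [])
        (pvA_some rest (PySem.Set.ofList (d.map Prod.fst)))) ?_
      dsimp only
      rw [Option.getD_some, pvFoldl_inter]
      rw [show pvAllKeys (d :: rest) = pvKeys d ++ pvAllKeys rest from rfl]
      rw [PySem.Set.ofList_append, PySem.Set.update_eq_append_filter, List.filter_append]
      rw [show pvKeys d = PySem.Set.ofList (d.map Prod.fst) from rfl, PySem.Set.ofList_ofList]
      have h2 : (List.filter (fun y => !(PySem.Set.ofList (d.map Prod.fst)).contains y)
            (PySem.Set.ofList (pvAllKeys rest))).filter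
            (fun k => (d :: rest).all (fun item => (item.map Prod.fst).contains k)) = [] := by
        rw [List.filter_eq_nil_iff]
        intro a ha hall
        rw [List.mem_filter] at ha
        rw [List.all_cons, Bool.and_eq_true] at hall
        have hca : (PySem.Set.ofList (d.map Prod.fst)).contains a = true := by
          rw [pvContains_ofList]
          exact hall.1
        simp only [Bool.not_eq_true'] at ha
        rw [hca] at ha
        exact Bool.false_ne_true ha.2.symm
      rw [h2, List.append_nil]
      apply List.filter_congr
      intro k hk
      rw [List.all_cons]
      have hck : (d.map Prod.fst).contains k = true := by
        rw [List.contains_iff_mem]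
        exact (PySem.Set.mem_ofList _ _).1 hk
      rw [hck, Bool.true_and]

-- ===== VERDICT (by name: the statement is the Claim_ definition above) =====
theorem intersect_nested_keysets_spec : Claim_equal_intersect_nested_keysets := by
  intro nested_items _
  unfold Spec_intersect_nested_keysets
  simp only [intersect_nested_keysets, intersect_nested_keysets_alt]
  have h := pvMain nested_items.flatten
  rw [List.foldl_flatten, List.foldl_flatten] at h
  exact h
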